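-- pv_equiv track=rewrite | github.com/NitroBooster2022/mpc | scripts/turning_wpts.py | find_segments
-- ===== SOURCE A (Python) =====
-- def find_segments(array, values):
--     """ Find start and end indices of segments in an array where the value matches. """
--     segments = []
--     start = None
--     for i, val in enumerate(array):
--         if val in values and start is None:
--             start = i
--         elif val not in values and start is not None:
--             segments.append((start, i))
--             start = None
--     if start is not None:
--         segments.append((start, len(array)))
--     return segments
-- ===== SOURCE B (Python) =====
-- from itertools import groupby
--
-- def find_segments(array, values):
--     """ Find start and end indices of segments in an array where the value matches. """
--     segments = []
--     idx = 0
--     for key, group in groupby(array, key=lambda v: v in values):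
--         length = sum(1 for _ in group)
--         if key:
--             segments.append((idx, idx + length))
--         idx += length
--     return segments
-- ===== Notes on version B (the rewrite author's own statement) =====
-- stated objective: idiomatic
-- what changed: Replaces the start/None state flag and the post-loop trailing-segment branch with itertools.groupby over membership, emitting one segment per True run from a running index.
import Mathlib
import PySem

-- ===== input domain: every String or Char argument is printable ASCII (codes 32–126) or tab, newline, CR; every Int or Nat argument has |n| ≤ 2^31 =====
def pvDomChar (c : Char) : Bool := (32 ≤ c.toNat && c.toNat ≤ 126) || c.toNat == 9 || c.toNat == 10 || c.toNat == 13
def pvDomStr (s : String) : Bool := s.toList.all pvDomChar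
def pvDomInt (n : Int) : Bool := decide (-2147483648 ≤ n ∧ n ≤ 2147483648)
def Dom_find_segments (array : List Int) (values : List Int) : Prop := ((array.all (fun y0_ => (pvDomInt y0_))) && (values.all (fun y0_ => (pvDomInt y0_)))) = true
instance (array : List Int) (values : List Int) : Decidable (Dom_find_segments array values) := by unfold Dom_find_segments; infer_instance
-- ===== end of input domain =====

-- B replaces A's start/None state flag and post-loop branch with groupby over membership (idiomatic decomposition).

-- ===== PORT A =====
-- the for-loop of A: state (segments, start), index i; branches in A's order
def aLoop (values : List Int) : List Int → Int → List (Int × Int) → Option Int → List (Int × Int) × Option Int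
  | [], _, segs, start => (segs, start)
  | val :: rest, i, segs, start =>
    if val ∈ values ∧ start = none then
      aLoop values rest (i + 1) segs (some i)
    else if val ∉ values ∧ start ≠ none then
      aLoop values rest (i + 1) (segs ++ [(start.getD 0, i)]) none
    else
      aLoop values rest (i + 1) segs start

def find_segments (array : List Int) (values : List Int) : List (Int × Int) :=
  let p := aLoop values array 0 [] none
  match p.2 with
  | some s => p.1 ++ [(s, (array.length : Int))]
  | none => p.1

-- ===== PORT B =====
-- groupby(array, key=lambda v: v in values): each step takes one maximal run of equal key
def bGo (values : List Int) : List Int → Int → List (Int × Int)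
  | [], _ => []
  | v :: rest, idx =>
    let key := decide (v ∈ values)
    let run := rest.takeWhile (fun x => decide (x ∈ values) == key)
    let length : Int := 1 + run.length
    let tail := bGo values (rest.dropWhile (fun x => decide (x ∈ values) == key)) (idx + length)
    if key then (idx, idx + length) :: tail else tail
  termination_by arr _ => arr.length
  decreasing_by
    simp only [List.length_cons]
    exact Nat.lt_succ_of_le (List.length_dropWhile_le _ _)

def find_segments_alt (array : List Int) (values : List Int) : List (Int × Int) :=
  bGo values array 0

-- ===== PRECONDITION & SPEC =====
def Spec_find_segments (array : List Int) (values : List Int) (out : List (Int × Int)) : Prop := out = find_segments_alt array values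
instance (array : List Int) (values : List Int) (out : List (Int × Int)) : Decidable (Spec_find_segments array values out) := by unfold Spec_find_segments; infer_instance

-- ===== CLAIM (what is proved, stated in full; the proofs are below) =====
def Claim_equal_find_segments : Prop := ∀ (array : List Int) (values : List Int), Dom_find_segments array values → Spec_find_segments array values (find_segments array values)

-- ===== LEMMAS AND PROOFS =====

-- common mid-level recursion: one element at a time, start carried as Option
def specF (values : List Int) : List Int → Int → Option Int → List (Int × Int)
  | [], _, none => []
  | [], i, some s => [(s, i)]
  | v :: rest, i, none =>
    if v ∈ values then specF values rest (i + 1) (some i) else specF values rest (i + 1) none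
  | v :: rest, i, some s =>
    if v ∈ values then specF values rest (i + 1) (some s)
    else (s, i) :: specF values rest (i + 1) none

def closeA (p : List (Int × Int) × Option Int) (n : Int) : List (Int × Int) :=
  match p.2 with
  | some s => p.1 ++ [(s, n)]
  | none => p.1

lemma aLoop_eq (values : List Int) :
    ∀ (arr : List Int) (i : Int) (segs : List (Int × Int)) (st : Option Int),
      closeA (aLoop values arr i segs st) (i + arr.length) = segs ++ specF values arr i st := by
  intro arr
  induction arr with
  | nil =>
    intro i segs st
    cases st <;> simp [aLoop, closeA, specF]
  | cons v rest ih =>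
    intro i segs st
    have hlen : (i + ((v :: rest).length : Int)) = (i + 1) + (rest.length : Int) := by
      simp [List.length_cons]; ring
    cases st with
    | none =>
      by_cases hv : v ∈ values
      · simp only [aLoop, hv, true_and, if_true, hlen, specF]
        exact ih (i + 1) segs (some i)
      · simp only [aLoop, hv, false_and, not_false_iff, true_and, ne_eq,
          not_true_eq_false, if_neg, hlen, specF]
        simpa using ih (i + 1) segs none
    | some s =>
      by_cases hv : v ∈ values
      · simp only [aLoop, hv, true_and, reduceCtorEq, if_false, not_true_eq_false, false_and,
          hlen, specF]
        exact ih (i + 1) segs (some s)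
      · simp only [aLoop, hv, false_and, if_false, not_false_iff, true_and, ne_eq, reduceCtorEq,
          if_pos, Option.getD_some, hlen, specF]
        rw [ih (i + 1) (segs ++ [(s, i)]) none]
        simp

-- inside a member-run: specF with (some s) emits (s, end-of-run) then restarts
lemma specF_some_run (values : List Int) :
    ∀ (rest : List Int) (j s : Int),
      specF values rest j (some s) =
        (s, j + ((rest.takeWhile (fun x => decide (x ∈ values))).length : Int)) ::
          specF values (rest.dropWhile (fun x => decide (x ∈ values))) (j + ((rest.takeWhile (fun x => decide (x ∈ values))).length : Int)) none := by
  intro rest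
  induction rest with
  | nil => intro j s; simp [specF]
  | cons v r ih =>
    intro j s
    by_cases hv : v ∈ values
    · have hd : decide (v ∈ values) = true := by simpa using hv
      simp only [specF, if_pos hv, List.takeWhile_cons, List.dropWhile_cons, hd, if_true,
        List.length_cons]
      rw [ih (j + 1) s]
      have : (j : Int) + ((r.takeWhile (fun x => decide (x ∈ values))).length + 1 : Nat) =
          (j + 1) + ((r.takeWhile (fun x => decide (x ∈ values))).length : Int) := by
        push_cast; ring
      rw [this]
    · have hd : decide (v ∈ values) = false := by simpa using hv
      simp [specF, if_neg hv, hd]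

-- skipping a non-member run leaves specF … none unchanged
lemma specF_none_skip (values : List Int) :
    ∀ (rest : List Int) (j : Int),
      specF values rest j none =
        specF values (rest.dropWhile (fun x => !decide (x ∈ values)))
          (j + ((rest.takeWhile (fun x => !decide (x ∈ values))).length : Int)) none := by
  intro rest
  induction rest with
  | nil => intro j; simp
  | cons v r ih =>
    intro j
    by_cases hv : v ∈ values
    · have hd : decide (v ∈ values) = true := by simpa using hv
      simp [hd]
    · have hd : decide (v ∈ values) = false := by simpa using hv
      simp only [specF, if_neg hv, List.takeWhile_cons, List.dropWhile_cons, hd,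
        Bool.not_false, if_true, List.length_cons]
      rw [ih (j + 1)]
      have : (j : Int) + ((r.takeWhile (fun x => !decide (x ∈ values))).length + 1 : Nat) =
          (j + 1) + ((r.takeWhile (fun x => !decide (x ∈ values))).length : Int) := by
        push_cast; ring
      rw [this]

lemma bGo_eq (values : List Int) :
    ∀ (arr : List Int) (idx : Int), bGo values arr idx = specF values arr idx none := by
  intro arr idx
  induction arr, idx using bGo.induct values with
  | case1 idx => simp [bGo, specF]
  | case2 v rest idx key run length hk ih =>
    have hd : decide (v ∈ values) = true := hk
    have hv : v ∈ values := of_decide_eq_true hd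
    have e1 : (fun x => decide (x ∈ values) == decide (v ∈ values)) =
        (fun x : Int => decide (x ∈ values)) := by
      funext x; rw [hd]; simp
    have ih' : bGo values (rest.dropWhile (fun x => decide (x ∈ values) == decide (v ∈ values)))
        (idx + (1 + ((rest.takeWhile (fun x => decide (x ∈ values) == decide (v ∈ values))).length : Int)))
        = specF values (rest.dropWhile (fun x => decide (x ∈ values) == decide (v ∈ values)))
          (idx + (1 + ((rest.takeWhile (fun x => decide (x ∈ values) == decide (v ∈ values))).length : Int))) none := ih
    rw [e1] at ih'
    rw [bGo]
    simp only [hd, if_true, beq_true]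
    rw [ih', specF, if_pos hv, specF_some_run]
    have harith : idx + (1 + ((rest.takeWhile (fun x => decide (x ∈ values))).length : Int)) =
        (idx + 1) + ((rest.takeWhile (fun x => decide (x ∈ values))).length : Int) := by ring
    rw [harith]
  | case3 v rest idx key run length hk ih =>
    have hd : decide (v ∈ values) = false := Bool.of_not_eq_true hk
    have hv : v ∉ values := of_decide_eq_false hd
    have e1 : (fun x => decide (x ∈ values) == decide (v ∈ values)) =
        (fun x : Int => !decide (x ∈ values)) := by
      funext x; rw [hd]; simp
    have ih' : bGo values (rest.dropWhile (fun x => decide (x ∈ values) == decide (v ∈ values)))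
        (idx + (1 + ((rest.takeWhile (fun x => decide (x ∈ values) == decide (v ∈ values))).length : Int)))
        = specF values (rest.dropWhile (fun x => decide (x ∈ values) == decide (v ∈ values)))
          (idx + (1 + ((rest.takeWhile (fun x => decide (x ∈ values) == decide (v ∈ values))).length : Int))) none := ih
    rw [e1] at ih'
    rw [bGo]
    simp only [hd, Bool.false_eq_true, if_false, beq_false]
    rw [ih', specF, if_neg hv, specF_none_skip values rest (idx + 1)]
    have harith : idx + (1 + ((rest.takeWhile (fun x => !decide (x ∈ values))).length : Int)) =
        (idx + 1) + ((rest.takeWhile (fun x => !decide (x ∈ values))).length : Int) := by ring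
    rw [harith]

theorem find_segments_spec : Claim_equal_find_segments := by
  intro array values _
  unfold Spec_find_segments find_segments find_segments_alt
  have h := aLoop_eq values array 0 [] none
  rw [zero_add, List.nil_append] at h
  rw [bGo_eq, ← h]
  rfl
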